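-- pv_equiv track=rewrite | github.com/CSAIL-LivingLab/extract | build/lib/extract/ingest.py | ordered_matches
-- ===== SOURCE A (Python) =====
-- def ordered_matches(x, patterns):
--   i = 0
--   matches = []
--   for pattern in patterns:
--     at = next_match(x, pattern, i)
--     i = at + len(pattern)
--     matches.append(at)
--   return matches
--
-- def next_match(x, pattern, start):
--   i = start
--   while i <= len(x) - len(pattern):
--     if x[i:i + len(pattern)] == pattern:
--       return i
--     i += 1
--   return -1
-- ===== SOURCE B (Python) =====
-- def ordered_matches(x, patterns):
--   occ_of = {}   # pattern -> sorted list of all positions where it matches in x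
--   i = 0
--   matches = []
--   for pattern in patterns:
--     if not pattern:
--       # the empty pattern matches immediately, at the start position itself
--       at = i if i <= len(x) else -1
--     else:
--       if pattern not in occ_of:
--         m = len(pattern)
--         occ_of[pattern] = [j for j in range(len(x) - m + 1) if x[j:j + m] == pattern]
--       at = first_at_least(occ_of[pattern], i)
--     i = at + len(pattern)
--     matches.append(at)
--   return matches
--
-- def first_at_least(occ, start):
--   # first element of the sorted list occ that is >= start, else -1 (binary search)
--   lo, hi = 0, len(occ)
--   while lo < hi:
--     mid = (lo + hi) // 2
--     if occ[mid] < start: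
--       lo = mid + 1
--     else:
--       hi = mid
--   return occ[lo] if lo < len(occ) else -1
-- ===== Notes on version B (the rewrite author's own statement) =====
-- stated objective: faster
-- what changed: Instead of restarting A's naive scan for every pattern query, B precomputes (once per DISTINCT pattern, memoized in a dict) the sorted list of all match positions in x and answers each query by binary search for the first position >= the running index; the empty pattern is answered in O(1) as matching at the start position itself.
import Mathlib
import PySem

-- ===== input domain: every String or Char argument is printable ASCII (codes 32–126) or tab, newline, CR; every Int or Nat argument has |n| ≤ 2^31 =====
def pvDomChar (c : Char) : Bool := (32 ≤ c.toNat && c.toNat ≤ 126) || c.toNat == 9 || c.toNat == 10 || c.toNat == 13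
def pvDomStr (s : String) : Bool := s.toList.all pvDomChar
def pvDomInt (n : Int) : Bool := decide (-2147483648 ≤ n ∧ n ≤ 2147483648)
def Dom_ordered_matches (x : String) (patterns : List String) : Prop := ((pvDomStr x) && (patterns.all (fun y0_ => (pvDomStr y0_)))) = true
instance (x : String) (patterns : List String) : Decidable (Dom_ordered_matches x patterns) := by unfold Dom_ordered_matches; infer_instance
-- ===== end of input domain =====

-- B precomputes, once per distinct pattern (memoized in a dict), the sorted list of all its
-- match positions in x, and answers each query by binary search for the first position ≥ the
-- running index, instead of A's restarted naive scan per query.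

-- ===== PORT A =====

-- while i <= len(x) - len(pattern): if x[i:i + len(pattern)] == pattern: return i; i += 1; return -1
-- (the loop runs at most len(x) - len(pattern) + 1 - i times; that count is the structural fuel)
def nextMatchGo (xs ps : List Char) : Nat → Int → Int
  | 0, _ => -1
  | fuel + 1, i =>
    if i ≤ (xs.length : Int) - (ps.length : Int) then
      if PySem.List.slice xs (some i) (some (i + (ps.length : Int))) = ps then i
      else nextMatchGo xs ps fuel (i + 1)
    else -1

def nextMatch (xs ps : List Char) (i : Int) : Int :=
  nextMatchGo xs ps ((xs.length : Int) - (ps.length : Int) + 1 - i).toNat i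

def ordered_matches (x : String) (patterns : List String) : List Int :=
  (patterns.foldl
    (fun (s : Int × List Int) pattern =>
      let at_ := nextMatch x.toList pattern.toList s.1
      (at_ + (pattern.toList.length : Int), s.2 ++ [at_]))
    ((0 : Int), ([] : List Int))).2

-- ===== PORT B =====

-- [j for j in range(len(x) - m + 1) if x[j:j + m] == pattern]
def occList (xs ps : List Char) : List Int :=
  (PySem.List.pyRange 0 ((xs.length : Int) - (ps.length : Int) + 1) 1).filter
    (fun j => decide (PySem.List.slice xs (some j) (some (j + (ps.length : Int))) = ps))

-- while lo < hi: mid = (lo + hi) // 2; if occ[mid] < start: lo = mid + 1 else: hi = mid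
-- then: return occ[lo] if lo < len(occ) else -1   (fuel = hi - lo bounds the iteration count)
def bsGo (occ : List Int) (s : Int) : Nat → Int → Int → Int
  | 0, lo, _ => if lo < (occ.length : Int) then PySem.List.pyGetD occ lo 0 else -1
  | fuel + 1, lo, hi =>
    if lo < hi then
      let mid := PySem.Int.floordiv (lo + hi) 2
      if PySem.List.pyGetD occ mid 0 < s then bsGo occ s fuel (mid + 1) hi
      else bsGo occ s fuel lo mid
    else if lo < (occ.length : Int) then PySem.List.pyGetD occ lo 0 else -1

def first_at_least (occ : List Int) (s : Int) : Int :=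
  bsGo occ s occ.length 0 (occ.length : Int)

-- loop body of B (the dict of memoized occurrence lists, the running index, the output)
def stepB (x : String) (st : PySem.Dict String (List Int) × Int × List Int) (pattern : String) :
    PySem.Dict String (List Int) × Int × List Int :=
  let i := st.2.1
  let p2 :=
    if pattern = "" then
      (st.1, if i ≤ (x.toList.length : Int) then i else -1)
    else
      let d' := if st.1.contains pattern then st.1
                else st.1.insert pattern (occList x.toList pattern.toList)
      (d', first_at_least (d'.getD pattern []) i)
  (p2.1, p2.2 + (pattern.toList.length : Int), st.2.2 ++ [p2.2])

def ordered_matches_alt (x : String) (patterns : List String) : List Int :=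
  (patterns.foldl (stepB x) (PySem.Dict.empty, (0 : Int), ([] : List Int))).2.2

-- ===== PRECONDITION & SPEC =====
def Spec_ordered_matches (x : String) (patterns : List String) (out : List Int) : Prop := out = ordered_matches_alt x patterns
instance (x : String) (patterns : List String) (out : List Int) : Decidable (Spec_ordered_matches x patterns out) := by unfold Spec_ordered_matches; infer_instance

-- ===== CLAIM (what is proved, stated in full; the proofs are below) =====
def Claim_equal_ordered_matches : Prop := ∀ (x : String) (patterns : List String), Dom_ordered_matches x patterns → Spec_ordered_matches x patterns (ordered_matches x patterns)

-- ===== LEMMAS AND PROOFS =====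

-- first element of l that is ≥ s, else -1 (proof-side characterisation of both searches)
def linFirst : List Int → Int → Int
  | [], _ => -1
  | a :: t, s => if a < s then linFirst t s else a

def runA (xs : List Char) : List String → Int → List Int
  | [], _ => []
  | p :: rest, i =>
    nextMatch xs p.toList i :: runA xs rest (nextMatch xs p.toList i + (p.toList.length : Int))

lemma fold_runA (x : String) : ∀ (pss : List String) (i : Int) (acc : List Int),
    (pss.foldl (fun (s : Int × List Int) pattern =>
      let at_ := nextMatch x.toList pattern.toList s.1
      (at_ + (pattern.toList.length : Int), s.2 ++ [at_])) (i, acc)).2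
      = acc ++ runA x.toList pss i := by
  intro pss
  induction pss with
  | nil => intro i acc; simp [runA]
  | cons p rest ih => intro i acc; simp only [List.foldl_cons, runA, ih]; simp

-- A's next_match on the empty pattern
lemma nextMatch_empty (xs : List Char) (i : Int) :
    nextMatch xs [] i = if i ≤ (xs.length : Int) then i else -1 := by
  unfold nextMatch
  by_cases h : i ≤ (xs.length : Int)
  · have hf : ((xs.length : Int) - (([] : List Char).length : Int) + 1 - i).toNat
        = ((xs.length : Int) - i).toNat + 1 := by simp; omega
    rw [hf]
    simp only [nextMatchGo]
    have hc : i ≤ (xs.length : Int) - (([] : List Char).length : Int) := by simp; omega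
    rw [if_pos hc]
    have hsl : PySem.List.slice xs (some i) (some (i + (([] : List Char).length : Int)))
        = ([] : List Char) := by
      apply List.length_eq_zero_iff.mp
      have hb : i + (([] : List Char).length : Int) = i := by simp
      rw [hb, PySem.List.length_slice]
      omega
    rw [if_pos hsl, if_pos h]
  · have hf : ((xs.length : Int) - (([] : List Char).length : Int) + 1 - i).toNat = 0 := by
      simp; omega
    rw [hf, if_neg h]
    rfl

lemma linFirst_eq_headD (l : List Int) (s : Int) :
    linFirst l s = (l.filter (fun a => decide (s ≤ a))).headD (-1) := by
  induction l with
  | nil => rfl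
  | cons a t ih =>
    by_cases h : a < s
    · have hd : decide (s ≤ a) = false := by simp; omega
      simp [linFirst, hd, if_pos h, ih]
    · have hd : decide (s ≤ a) = true := by simp; omega
      simp [linFirst, hd, if_neg h]

lemma occList_sorted (xs ps : List Char) : (occList xs ps).Pairwise (· < ·) := by
  unfold occList
  exact List.Pairwise.sublist List.filter_sublist (PySem.List.pairwise_lt_pyRange_one 0 _)

lemma occList_nonneg (xs ps : List Char) : ∀ a ∈ occList xs ps, 0 ≤ a := by
  intro a ha
  unfold occList at ha
  rw [List.mem_filter] at ha
  have := (PySem.List.mem_pyRange_one).1 ha.1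
  omega

lemma linFirst_char (s : Int) : ∀ (l : List Int) (j : Nat),
    (∀ k (hk : k < l.length), k < j → l[k] < s) →
    (∀ k (hk : k < l.length), j ≤ k → s ≤ l[k]) →
    linFirst l s = if h : j < l.length then l[j] else -1 := by
  intro l
  induction l with
  | nil => intro j _ _; simp [linFirst]
  | cons a t ih =>
    intro j h1 h2
    cases j with
    | zero =>
      have hs : s ≤ a := by
        have := h2 0 (by simp) (by omega)
        simpa using this
      rw [dif_pos (by simp : 0 < (a :: t).length)]
      simp [linFirst, if_neg (by omega : ¬ a < s)]
    | succ j =>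
      have ha : a < s := by
        have := h1 0 (by simp) (by omega)
        simpa using this
      simp only [linFirst, if_pos ha]
      rw [ih j (fun k hk hkj => by
            have := h1 (k + 1) (by simpa using Nat.succ_lt_succ hk) (by omega)
            simpa using this)
          (fun k hk hjk => by
            have := h2 (k + 1) (by simpa using Nat.succ_lt_succ hk) (by omega)
            simpa using this)]
      by_cases hj : j < t.length
      · rw [dif_pos hj, dif_pos (by simpa using Nat.succ_lt_succ hj)]
        simp
      · rw [dif_neg hj, dif_neg (by simp; omega)]

lemma bsExit_eq (occ : List Int) (s lo : Int) (h0 : 0 ≤ lo)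
    (h1 : ∀ k (hk : k < occ.length), (k : Int) < lo → occ[k] < s)
    (h2 : ∀ k (hk : k < occ.length), lo ≤ (k : Int) → s ≤ occ[k]) :
    (if lo < (occ.length : Int) then PySem.List.pyGetD occ lo 0 else -1) = linFirst occ s := by
  rw [linFirst_char s occ lo.toNat
      (fun k hk hkj => h1 k hk (by omega))
      (fun k hk hjk => h2 k hk (by omega))]
  by_cases hl : lo < (occ.length : Int)
  · rw [if_pos hl, dif_pos (by omega : lo.toNat < occ.length)]
    exact PySem.List.pyGetD_eq_getElem occ 0 h0 hl
  · rw [if_neg hl, dif_neg (by omega)]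

lemma bsGo_eq (occ : List Int) (s : Int) (hs : occ.Pairwise (· < ·)) :
    ∀ (fuel : Nat) (lo hi : Int), 0 ≤ lo → lo ≤ hi → hi ≤ (occ.length : Int) →
    (hi - lo).toNat ≤ fuel →
    (∀ k (hk : k < occ.length), (k : Int) < lo → occ[k] < s) →
    (∀ k (hk : k < occ.length), hi ≤ (k : Int) → s ≤ occ[k]) →
    bsGo occ s fuel lo hi = linFirst occ s := by
  intro fuel
  induction fuel with
  | zero =>
    intro lo hi hlo hlh hhi hfuel h1 h2
    have heq : lo = hi := by omega
    subst heq
    exact bsExit_eq occ s lo hlo h1 h2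
  | succ fuel ih =>
    intro lo hi hlo hlh hhi hfuel h1 h2
    by_cases hlt : lo < hi
    · simp only [bsGo, if_pos hlt]
      have hmid2 : PySem.Int.floordiv (lo + hi) 2 = (lo + hi) / 2 :=
        PySem.Int.floordiv_eq_ediv_of_pos (by norm_num)
      set mid := PySem.Int.floordiv (lo + hi) 2 with hmid
      have hml : mid < (occ.length : Int) := by omega
      have hm0 : lo ≤ mid := by omega
      have hmhi : mid < hi := by omega
      have hg : PySem.List.pyGetD occ mid 0 = occ[mid.toNat]'(by omega) :=
        PySem.List.pyGetD_eq_getElem occ 0 (by omega) hml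
      rw [hg]
      have hpw := List.pairwise_iff_getElem.mp hs
      by_cases hc : occ[mid.toNat]'(by omega) < s
      · rw [if_pos hc]
        apply ih (mid + 1) hi (by omega) (by omega) hhi (by omega) ?_ h2
        intro k hk hklt
        rcases Nat.lt_or_ge k mid.toNat with h | h
        · exact lt_trans (hpw k mid.toNat hk (by omega) h) hc
        · have hkm : k = mid.toNat := by omega
          subst hkm
          exact hc
      · rw [if_neg hc]
        apply ih lo mid (by omega) (by omega) (by omega) (by omega) h1 ?_
        intro k hk hge
        rcases Nat.lt_or_ge mid.toNat k with h | h
        · have := hpw mid.toNat k (by omega) hk h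
          omega
        · have hkm : k = mid.toNat := by omega
          subst hkm
          omega
    · simp only [bsGo, if_neg hlt]
      exact bsExit_eq occ s lo hlo h1 (fun k hk hge => h2 k hk (by omega))

lemma first_at_least_eq (occ : List Int) (s : Int) (hs : occ.Pairwise (· < ·)) :
    first_at_least occ s = linFirst occ s := by
  unfold first_at_least
  apply bsGo_eq occ s hs occ.length 0 (occ.length : Int) le_rfl (by omega) le_rfl (by omega)
  · intro k hk h
    exact absurd h (by omega)
  · intro k hk h
    exact absurd h (by omega)

lemma filter_range_ge (K s : Int) (h0 : 0 ≤ s) :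
    (PySem.List.pyRange 0 K 1).filter (fun a => decide (s ≤ a)) = PySem.List.pyRange s K 1 := by
  by_cases hsK : s ≤ K
  · rw [PySem.List.pyRange_one_append 0 s K h0 hsK, List.filter_append]
    have h1 : (PySem.List.pyRange 0 s 1).filter (fun a => decide (s ≤ a)) = [] := by
      apply List.filter_eq_nil_iff.mpr
      intro a ha
      have := (PySem.List.mem_pyRange_one).1 ha
      simp; omega
    have h2 : (PySem.List.pyRange s K 1).filter (fun a => decide (s ≤ a))
        = PySem.List.pyRange s K 1 := by
      apply List.filter_eq_self.mpr
      intro a ha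
      have := (PySem.List.mem_pyRange_one).1 ha
      simp; omega
    rw [h1, h2, List.nil_append]
  · rw [PySem.List.pyRange_one_eq_nil (by omega : K ≤ s)]
    apply List.filter_eq_nil_iff.mpr
    intro a ha
    have := (PySem.List.mem_pyRange_one).1 ha
    simp; omega

lemma go_eq_head (xs ps : List Char) : ∀ (fuel : Nat) (i : Int), 0 ≤ i →
    ((xs.length : Int) - (ps.length : Int) + 1 - i).toNat = fuel →
    nextMatchGo xs ps fuel i =
      ((PySem.List.pyRange i ((xs.length : Int) - (ps.length : Int) + 1) 1).filter
        (fun j => decide (PySem.List.slice xs (some j) (some (j + (ps.length : Int))) = ps))).headD (-1) := by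
  intro fuel
  induction fuel with
  | zero =>
    intro i _ hfi
    rw [PySem.List.pyRange_one_eq_nil (by omega)]
    rfl
  | succ fuel ih =>
    intro i h0 hfi
    simp only [nextMatchGo]
    rw [if_pos (by omega : i ≤ (xs.length : Int) - (ps.length : Int))]
    rw [PySem.List.pyRange_one_cons (by omega : i < (xs.length : Int) - (ps.length : Int) + 1)]
    rw [List.filter_cons]
    by_cases hm : PySem.List.slice xs (some i) (some (i + (ps.length : Int))) = ps
    · rw [if_pos hm]
      simp [hm]
    · rw [if_neg hm]
      have hd : decide (PySem.List.slice xs (some i) (some (i + (ps.length : Int))) = ps)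
          = false := by simp [hm]
      rw [hd]
      simp only [Bool.false_eq_true, if_false]
      exact ih (i + 1) (by omega) (by omega)

lemma nextMatch_eq_linFirst_nonneg (xs ps : List Char) (i : Int) (h0 : 0 ≤ i) :
    nextMatch xs ps i = linFirst (occList xs ps) i := by
  unfold nextMatch
  rw [go_eq_head xs ps _ i h0 rfl, linFirst_eq_headD]
  congr 1
  have hswap : ((PySem.List.pyRange 0 ((xs.length : Int) - (ps.length : Int) + 1) 1).filter
        (fun a => decide (i ≤ a))).filter
        (fun j => decide (PySem.List.slice xs (some j) (some (j + (ps.length : Int))) = ps))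
      = ((PySem.List.pyRange 0 ((xs.length : Int) - (ps.length : Int) + 1) 1).filter
        (fun j => decide (PySem.List.slice xs (some j) (some (j + (ps.length : Int))) = ps))).filter
        (fun a => decide (i ≤ a)) := by
    rw [List.filter_filter, List.filter_filter]
    apply List.filter_congr
    intro a _
    exact Bool.and_comm _ _
  calc (PySem.List.pyRange i ((xs.length : Int) - (ps.length : Int) + 1) 1).filter
        (fun j => decide (PySem.List.slice xs (some j) (some (j + (ps.length : Int))) = ps))
      = ((PySem.List.pyRange 0 ((xs.length : Int) - (ps.length : Int) + 1) 1).filter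
        (fun a => decide (i ≤ a))).filter
        (fun j => decide (PySem.List.slice xs (some j) (some (j + (ps.length : Int))) = ps)) := by
        rw [filter_range_ge _ i h0]
    _ = _ := by rw [hswap]; rfl

lemma linFirst_neg_one_eq_zero (l : List Int) (h : ∀ a ∈ l, 0 ≤ a) :
    linFirst l (-1) = linFirst l 0 := by
  induction l with
  | nil => rfl
  | cons a t ih =>
    have ha : 0 ≤ a := h a (by simp)
    simp only [linFirst, if_neg (by omega : ¬ a < -1), if_neg (by omega : ¬ a < 0)]

lemma nextMatch_eq_linFirst_neg_one (xs ps : List Char) (hps : ps ≠ []) :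
    nextMatch xs ps (-1) = linFirst (occList xs ps) (-1) := by
  have hm1 : 1 ≤ ps.length := List.length_pos_iff.mpr hps
  by_cases hK : (xs.length : Int) - (ps.length : Int) + 1 ≤ -1
  · have hf : ((xs.length : Int) - (ps.length : Int) + 1 - (-1)).toNat = 0 := by omega
    unfold nextMatch
    rw [hf]
    have hocc : occList xs ps = [] := by
      unfold occList
      rw [PySem.List.pyRange_one_eq_nil (by omega)]
      rfl
    rw [hocc]
    rfl
  · have hf : ((xs.length : Int) - (ps.length : Int) + 1 - (-1)).toNat
        = ((xs.length : Int) - (ps.length : Int) + 1).toNat + 1 := by omega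
    unfold nextMatch
    rw [hf]
    simp only [nextMatchGo]
    rw [if_pos (by omega : (-1 : Int) ≤ (xs.length : Int) - (ps.length : Int))]
    have hsl : PySem.List.slice xs (some (-1)) (some (-1 + (ps.length : Int))) ≠ ps := by
      intro heq
      have hlen := congrArg List.length heq
      rw [PySem.List.length_slice] at hlen
      rw [PySem.List.clampIdx_neg_one] at hlen
      have hb : (-1 : Int) + (ps.length : Int) = ((ps.length - 1 : Nat) : Int) := by omega
      rw [hb, PySem.List.clampIdx_natCast] at hlen
      omega
    rw [if_neg hsl]
    have h01 : (-1 : Int) + 1 = 0 := by norm_num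
    rw [h01]
    rw [go_eq_head xs ps ((xs.length : Int) - (ps.length : Int) + 1).toNat 0 le_rfl (by omega)]
    rw [linFirst_neg_one_eq_zero _ (occList_nonneg xs ps), linFirst_eq_headD]
    have hfil : (occList xs ps).filter (fun a => decide (0 ≤ a)) = occList xs ps :=
      List.filter_eq_self.mpr (fun a ha => by simpa using occList_nonneg xs ps a ha)
    rw [hfil]
    rfl

lemma linFirst_ge (l : List Int) (s : Int) (h : ∀ a ∈ l, 0 ≤ a) : -1 ≤ linFirst l s := by
  induction l with
  | nil => simp [linFirst]
  | cons a t ih =>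
    have ha : 0 ≤ a := h a (by simp)
    simp only [linFirst]
    split_ifs
    · exact ih (fun b hb => h b (by simp [hb]))
    · omega

lemma nextMatch_ge (xs : List Char) (p : String) (i : Int) (hi : -1 ≤ i) :
    -1 ≤ nextMatch xs p.toList i := by
  by_cases hp : p = ""
  · subst hp
    rw [show ("" : String).toList = [] by simp, nextMatch_empty]
    split_ifs <;> omega
  · have hne : p.toList ≠ [] := fun h => hp (String.toList_eq_nil_iff.mp h)
    have hocc := occList_nonneg xs p.toList
    rcases (by omega : i = -1 ∨ 0 ≤ i) with h | h
    · subst h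
      rw [nextMatch_eq_linFirst_neg_one xs p.toList hne]
      exact linFirst_ge _ _ hocc
    · rw [nextMatch_eq_linFirst_nonneg xs p.toList i h]
      exact linFirst_ge _ _ hocc

lemma stepB_eq_of_inv (x : String) (d : PySem.Dict String (List Int)) (i : Int)
    (acc : List Int) (p : String)
    (hinv : ∀ q l, d.get? q = some l → l = occList x.toList q.toList) (hi : -1 ≤ i) :
    ∃ d2, stepB x (d, i, acc) p
        = (d2, nextMatch x.toList p.toList i + (p.toList.length : Int),
            acc ++ [nextMatch x.toList p.toList i]) ∧
      (∀ q l, d2.get? q = some l → l = occList x.toList q.toList) := by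
  by_cases hp : p = ""
  · subst hp
    refine ⟨d, ?_, hinv⟩
    simp [stepB, nextMatch_empty]
  · have hne : p.toList ≠ [] := fun h => hp (String.toList_eq_nil_iff.mp h)
    by_cases hc : d.contains p = true
    · obtain ⟨l, hl⟩ : ∃ l, d.get? p = some l := by
        cases hq : d.get? p with
        | none =>
          rw [PySem.Dict.get?_eq_none_iff_contains] at hq
          rw [hc] at hq
          cases hq
        | some l => exact ⟨l, rfl⟩
      refine ⟨d, ?_, hinv⟩
      have hgetD : d.getD p [] = occList x.toList p.toList := by
        rw [PySem.Dict.getD_of_get?_eq_some d [] hl, hinv p l hl]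
      have hnm : nextMatch x.toList p.toList i
          = first_at_least (occList x.toList p.toList) i := by
        rw [first_at_least_eq _ _ (occList_sorted _ _)]
        rcases (by omega : i = -1 ∨ 0 ≤ i) with h | h
        · subst h
          exact nextMatch_eq_linFirst_neg_one x.toList p.toList hne
        · exact nextMatch_eq_linFirst_nonneg x.toList p.toList i h
      simp [stepB, if_neg hp, hc, hgetD, hnm]
    · have hc' : d.contains p = false := by
        cases h : d.contains p
        · rfl
        · exact absurd h hc
      refine ⟨d.insert p (occList x.toList p.toList), ?_, ?_⟩
      · have hgetD : (d.insert p (occList x.toList p.toList)).getD p []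
            = occList x.toList p.toList := by
          rw [PySem.Dict.getD_insert_self]
        have hnm : nextMatch x.toList p.toList i
            = first_at_least (occList x.toList p.toList) i := by
          rw [first_at_least_eq _ _ (occList_sorted _ _)]
          rcases (by omega : i = -1 ∨ 0 ≤ i) with h | h
          · subst h
            exact nextMatch_eq_linFirst_neg_one x.toList p.toList hne
          · exact nextMatch_eq_linFirst_nonneg x.toList p.toList i h
        simp [stepB, if_neg hp, hc', hgetD, hnm]
      · intro q l hql
        rw [PySem.Dict.get?_insert] at hql
        by_cases hqp : q = p
        · rw [if_pos hqp] at hql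
          cases hql
          rw [hqp]
        · rw [if_neg hqp] at hql
          exact hinv q l hql

-- main synchronisation: B's fold (with a correctly-memoized dict) produces runA
lemma foldB_eq (x : String) : ∀ (pss : List String) (d : PySem.Dict String (List Int))
    (i : Int) (acc : List Int),
    (∀ p l, d.get? p = some l → l = occList x.toList p.toList) → -1 ≤ i →
    (pss.foldl (stepB x) (d, i, acc)).2.2 = acc ++ runA x.toList pss i := by
  intro pss
  induction pss with
  | nil => intro d i acc _ _; simp [runA]
  | cons p rest ih =>
    intro d i acc hinv hi
    obtain ⟨d2, hstep, hinv2⟩ := stepB_eq_of_inv x d i acc p hinv hi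
    rw [List.foldl_cons, hstep,
      ih d2 _ _ hinv2 (by have := nextMatch_ge x.toList p i hi; omega)]
    simp [runA]

-- ===== VERDICT (by name: the statement is the Claim_ definition above) =====
theorem ordered_matches_spec : Claim_equal_ordered_matches := by
  intro x patterns _hDom
  show ordered_matches x patterns = ordered_matches_alt x patterns
  have hA : ordered_matches x patterns = runA x.toList patterns 0 := by
    simpa using fold_runA x patterns 0 []
  have hB : ordered_matches_alt x patterns = runA x.toList patterns 0 := by
    simpa using foldB_eq x patterns PySem.Dict.empty 0 []
      (by intro p l h; simp [PySem.Dict.get?_empty] at h) (by omega)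
  rw [hA, hB]
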